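-- pv_equiv track=rewrite | github.com/cam-douglas/quark | state/quark_state_system/task_management/sprint_management.py | assign_pfo_stage
-- ===== SOURCE A (Python) =====
-- def assign_pfo_stage(section_name: str, category: str) -> str:
--     """Assign P/F/A/O stage based on section and category."""
--     section_lower = section_name.lower()
--     category_lower = category.lower()
--
--     # Probe stages (P1-P4) - Discovery and planning
--     if any(keyword in section_lower for keyword in ["goal", "objective", "requirement"]):
--         if any(keyword in category_lower for keyword in ["foundation", "core", "basic"]):
--             return "P1"  # Discover
--         elif any(keyword in category_lower for keyword in ["research", "analysis"]):
--             return "P2"  # Research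
--         elif any(keyword in category_lower for keyword in ["definition", "scope"]):
--             return "P3"  # Define
--         else:
--             return "P4"  # Reflect
--
--     # Forge stages (F1-F4) - Design and implementation
--     elif any(keyword in section_lower for keyword in ["engineering", "implementation", "development"]):
--         if any(keyword in category_lower for keyword in ["design", "architecture"]):
--             return "F1"  # Design
--         elif any(keyword in category_lower for keyword in ["develop", "implement", "build"]):
--             return "F2"  # Develop
--         elif any(keyword in category_lower for keyword in ["integrate", "refine"]):
--             return "F3"  # Integrate
--         else:
--             return "F4"  # Demo
--
--     # Assure stages (A1-A4) - Testing and validation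
--     elif any(keyword in section_lower for keyword in ["sota", "practice", "method"]):
--         return "A2"  # Test/Practice
--
--     # Operate stages (O1-O4) - Deploy and monitor
--     elif any(keyword in section_lower for keyword in ["deliverable", "acceptance"]):
--         return "O1"  # Prepare
--
--     # Default based on category
--     if any(keyword in category_lower for keyword in ["foundation", "core"]):
--         return "P1"  # Discover
--     elif any(keyword in category_lower for keyword in ["development", "implementation"]):
--         return "F2"  # Develop
--     else:
--         return "P2"  # Research
-- ===== SOURCE B (Python) =====
-- # Min-rank re-implementation: flatten every keyword into one ranked map, aggregate
-- # with min() over ALL matches (no ordered first-match chains), then map ranks to codes.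
-- SECTION_RANK = {
--     "goal": 0, "objective": 0, "requirement": 0,
--     "engineering": 1, "implementation": 1, "development": 1,
--     "sota": 2, "practice": 2, "method": 2,
--     "deliverable": 3, "acceptance": 3,
-- }
-- PROBE_RANK = {
--     "foundation": 0, "core": 0, "basic": 0,
--     "research": 1, "analysis": 1,
--     "definition": 2, "scope": 2,
-- }
-- FORGE_RANK = {
--     "design": 0, "architecture": 0,
--     "develop": 1, "implement": 1, "build": 1,
--     "integrate": 2, "refine": 2,
-- }
-- FALLBACK_RANK = {
--     "foundation": 0, "core": 0,
--     "development": 1, "implementation": 1,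
-- }
--
--
-- def _min_rank(table, text, default):
--     """Smallest rank among all keywords occurring in text (default if none)."""
--     return min((r for kw, r in table.items() if kw in text), default=default)
--
--
-- def assign_pfo_stage(section_name: str, category: str) -> str:
--     s = section_name.lower()
--     c = category.lower()
--     sg = _min_rank(SECTION_RANK, s, 4)
--     if sg == 0:
--         return ("P1", "P2", "P3", "P4")[_min_rank(PROBE_RANK, c, 3)]
--     if sg == 1:
--         return ("F1", "F2", "F3", "F4")[_min_rank(FORGE_RANK, c, 3)]
--     if sg == 2:
--         return "A2"
--     if sg == 3:
--         return "O1"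
--     return ("P1", "F2", "P2")[_min_rank(FALLBACK_RANK, c, 2)]
-- ===== Notes on version B (the rewrite author's own statement) =====
-- stated objective: alternative
-- what changed: Replaced A's ordered first-match if/elif chains by flat keyword-to-rank maps aggregated with min() over ALL matched keywords (correct because each table's ranks are nondecreasing, so the minimum matched rank equals the first matching group), followed by rank-to-code tuple lookups.
import Mathlib
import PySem

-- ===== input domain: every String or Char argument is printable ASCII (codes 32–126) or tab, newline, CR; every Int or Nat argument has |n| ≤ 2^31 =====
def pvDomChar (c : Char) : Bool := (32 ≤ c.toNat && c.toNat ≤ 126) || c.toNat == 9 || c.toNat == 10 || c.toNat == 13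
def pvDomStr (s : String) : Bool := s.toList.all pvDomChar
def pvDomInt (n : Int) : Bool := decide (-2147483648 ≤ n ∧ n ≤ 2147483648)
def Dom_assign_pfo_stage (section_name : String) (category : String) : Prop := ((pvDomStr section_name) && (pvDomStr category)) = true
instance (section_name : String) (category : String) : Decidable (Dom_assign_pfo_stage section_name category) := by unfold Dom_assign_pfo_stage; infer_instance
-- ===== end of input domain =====

-- B replaces A's ordered first-match if/elif chains by flat keyword→rank maps aggregated with min() over ALL matches, then rank→code table lookups (objective: alternative).

-- ===== PORT A =====
def assign_pfo_stage (section_name : String) (category : String) : String :=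
  let section_lower := PySem.Str.lower section_name
  let category_lower := PySem.Str.lower category
  if ["goal", "objective", "requirement"].any (fun k => PySem.Str.isIn k section_lower) then
    if ["foundation", "core", "basic"].any (fun k => PySem.Str.isIn k category_lower) then "P1"
    else if ["research", "analysis"].any (fun k => PySem.Str.isIn k category_lower) then "P2"
    else if ["definition", "scope"].any (fun k => PySem.Str.isIn k category_lower) then "P3"
    else "P4"
  else if ["engineering", "implementation", "development"].any (fun k => PySem.Str.isIn k section_lower) then
    if ["design", "architecture"].any (fun k => PySem.Str.isIn k category_lower) then "F1"
    else if ["develop", "implement", "build"].any (fun k => PySem.Str.isIn k category_lower) then "F2"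
    else if ["integrate", "refine"].any (fun k => PySem.Str.isIn k category_lower) then "F3"
    else "F4"
  else if ["sota", "practice", "method"].any (fun k => PySem.Str.isIn k section_lower) then "A2"
  else if ["deliverable", "acceptance"].any (fun k => PySem.Str.isIn k section_lower) then "O1"
  else if ["foundation", "core"].any (fun k => PySem.Str.isIn k category_lower) then "P1"
  else if ["development", "implementation"].any (fun k => PySem.Str.isIn k category_lower) then "F2"
  else "P2"

-- ===== PORT B =====
-- B: one flat keyword→rank table per decision, min over ALL matched ranks, then a code table.
def pvSectionRank : List (String × Nat) :=
  [("goal", 0), ("objective", 0), ("requirement", 0),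
   ("engineering", 1), ("implementation", 1), ("development", 1),
   ("sota", 2), ("practice", 2), ("method", 2),
   ("deliverable", 3), ("acceptance", 3)]

def pvProbeRank : List (String × Nat) :=
  [("foundation", 0), ("core", 0), ("basic", 0),
   ("research", 1), ("analysis", 1),
   ("definition", 2), ("scope", 2)]

def pvForgeRank : List (String × Nat) :=
  [("design", 0), ("architecture", 0),
   ("develop", 1), ("implement", 1), ("build", 1),
   ("integrate", 2), ("refine", 2)]

def pvFallbackRank : List (String × Nat) :=
  [("foundation", 0), ("core", 0),
   ("development", 1), ("implementation", 1)]

-- min((r for kw, r in table.items() if kw in text), default=dflt)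
def pvMinRank (table : List (String × Nat)) (text : String) (dflt : Nat) : Nat :=
  match table.filterMap (fun p => if PySem.Str.isIn p.1 text then some p.2 else none) with
  | [] => dflt
  | x :: xs => xs.foldl Nat.min x

-- ("..", "..")[i]  (the index is always in range in B)
def pvCodeAt (codes : List String) (i : Nat) : String :=
  (PySem.List.pyGet? codes (Int.ofNat i)).getD ""

def assign_pfo_stage_alt (section_name : String) (category : String) : String :=
  let s := PySem.Str.lower section_name
  let c := PySem.Str.lower category
  let sg := pvMinRank pvSectionRank s 4
  if sg = 0 then pvCodeAt ["P1", "P2", "P3", "P4"] (pvMinRank pvProbeRank c 3)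
  else if sg = 1 then pvCodeAt ["F1", "F2", "F3", "F4"] (pvMinRank pvForgeRank c 3)
  else if sg = 2 then "A2"
  else if sg = 3 then "O1"
  else pvCodeAt ["P1", "F2", "P2"] (pvMinRank pvFallbackRank c 2)

-- ===== PRECONDITION & SPEC =====
def Spec_assign_pfo_stage (section_name : String) (category : String) (out : String) : Prop := out = assign_pfo_stage_alt section_name category
instance (section_name : String) (category : String) (out : String) : Decidable (Spec_assign_pfo_stage section_name category out) := by unfold Spec_assign_pfo_stage; infer_instance

-- ===== CLAIM (what is proved, stated in full; the proofs are below) =====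
def Claim_equal_assign_pfo_stage : Prop := ∀ (section_name : String) (category : String), Dom_assign_pfo_stage section_name category → Spec_assign_pfo_stage section_name category (assign_pfo_stage section_name category)

-- ===== LEMMAS AND PROOFS =====

-- First-match rank (proof-only helper: what A's ordered chains compute per table).
def pvFirstRank : List (String × Nat) → String → Nat → Nat
  | [], _, d => d
  | (kw, r) :: rest, t, d => if PySem.Str.isIn kw t then r else pvFirstRank rest t d

theorem foldl_min_of_le (xs : List Nat) (x : Nat) (h : ∀ y ∈ xs, x ≤ y) :
    xs.foldl Nat.min x = x := by
  induction xs with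
  | nil => rfl
  | cons y ys ih =>
    simp only [List.foldl_cons]
    have hx : Nat.min x y = x := Nat.min_eq_left (h y (List.mem_cons_self))
    rw [hx]
    exact ih (fun z hz => h z (List.mem_cons_of_mem _ hz))

-- With nondecreasing ranks, the min over all matched keywords is the first match.
theorem pvMinRank_eq_firstRank (table : List (String × Nat)) (t : String) (d : Nat)
    (hs : List.Pairwise (fun p q : String × Nat => p.2 ≤ q.2) table) :
    pvMinRank table t d = pvFirstRank table t d := by
  induction table with
  | nil => rfl
  | cons p rest ih =>
    obtain ⟨kw, r⟩ := p
    rw [List.pairwise_cons] at hs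
    by_cases h : PySem.Str.isIn kw t
    · simp only [pvMinRank, pvFirstRank, List.filterMap_cons, h, if_pos]
      apply foldl_min_of_le
      intro y hy
      obtain ⟨q, hq, hfq⟩ := List.mem_filterMap.mp hy
      simp at hfq
      exact hfq.2 ▸ hs.1 q hq
    · simp only [pvMinRank, pvFirstRank, List.filterMap_cons, h, Bool.false_eq_true, if_false]
      exact (ih hs.2)

set_option maxHeartbeats 1000000 in
theorem pvMinRank_section (t : String) :
    pvMinRank pvSectionRank t 4 =
      (if ["goal", "objective", "requirement"].any (fun k => PySem.Str.isIn k t) then 0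
       else if ["engineering", "implementation", "development"].any (fun k => PySem.Str.isIn k t) then 1
       else if ["sota", "practice", "method"].any (fun k => PySem.Str.isIn k t) then 2
       else if ["deliverable", "acceptance"].any (fun k => PySem.Str.isIn k t) then 3
       else 4) := by
  rw [pvMinRank_eq_firstRank _ _ _ (by decide)]
  simp only [pvSectionRank, pvFirstRank, List.any_cons, List.any_nil]
  split_ifs <;> simp_all

theorem pvMinRank_probe (t : String) :
    pvMinRank pvProbeRank t 3 =
      (if ["foundation", "core", "basic"].any (fun k => PySem.Str.isIn k t) then 0
       else if ["research", "analysis"].any (fun k => PySem.Str.isIn k t) then 1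
       else if ["definition", "scope"].any (fun k => PySem.Str.isIn k t) then 2
       else 3) := by
  rw [pvMinRank_eq_firstRank _ _ _ (by decide)]
  simp only [pvProbeRank, pvFirstRank, List.any_cons, List.any_nil]
  split_ifs <;> simp_all

theorem pvMinRank_forge (t : String) :
    pvMinRank pvForgeRank t 3 =
      (if ["design", "architecture"].any (fun k => PySem.Str.isIn k t) then 0
       else if ["develop", "implement", "build"].any (fun k => PySem.Str.isIn k t) then 1
       else if ["integrate", "refine"].any (fun k => PySem.Str.isIn k t) then 2
       else 3) := by
  rw [pvMinRank_eq_firstRank _ _ _ (by decide)]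
  simp only [pvForgeRank, pvFirstRank, List.any_cons, List.any_nil]
  split_ifs <;> simp_all

theorem pvMinRank_fallback (t : String) :
    pvMinRank pvFallbackRank t 2 =
      (if ["foundation", "core"].any (fun k => PySem.Str.isIn k t) then 0
       else if ["development", "implementation"].any (fun k => PySem.Str.isIn k t) then 1
       else 2) := by
  rw [pvMinRank_eq_firstRank _ _ _ (by decide)]
  simp only [pvFallbackRank, pvFirstRank, List.any_cons, List.any_nil]
  split_ifs <;> simp_all

-- ===== VERDICT (by name: the statement is the Claim_ definition above) =====
set_option maxHeartbeats 1000000 in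
theorem assign_pfo_stage_spec : Claim_equal_assign_pfo_stage := by
  intro section_name category _
  unfold Spec_assign_pfo_stage assign_pfo_stage assign_pfo_stage_alt
  simp only [pvMinRank_section, pvMinRank_probe, pvMinRank_forge, pvMinRank_fallback]
  split_ifs <;> first | rfl | simp_all
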